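-- pv_equiv track=rewrite | github.com/wenzhe-log10/quote-verbatim-qa | src/quote_verifier/cli.py | fragments_in_order
-- ===== SOURCE A (Python) =====
-- def fragments_in_order(fragments: list[str], text: str) -> bool:
--     pos = 0
--     for frag in fragments:
--         idx = text.find(frag, pos)
--         if idx < 0:
--             return False
--         pos = idx + len(frag)
--     return True
-- ===== SOURCE B (Python) =====
-- def fragments_in_order(fragments: list[str], text: str) -> bool:
--     # Reverse greedy, expressed recursively: ok(k, end_limit) decides whether
--     # fragments[0..k] fit in order within text[:end_limit], placing fragments[k]
--     # at its rightmost occurrence and recursing on the prefix before it.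
--     def ok(k: int, end_limit: int) -> bool:
--         if k < 0:
--             return True
--         idx = text.rfind(fragments[k], 0, end_limit)
--         return idx >= 0 and ok(k - 1, idx)
--     return ok(len(fragments) - 1, len(text))
-- ===== Notes on version B (the rewrite author's own statement) =====
-- stated objective: alternative
-- what changed: Replaces A's forward greedy loop (advance a lower bound pos with text.find) by a recursive reverse greedy: recurse over fragment indices from the last to the first, shrinking an upper bound with text.rfind(frag, 0, end_limit); the booleans coincide by a greedy-exchange argument.
import Mathlib
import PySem

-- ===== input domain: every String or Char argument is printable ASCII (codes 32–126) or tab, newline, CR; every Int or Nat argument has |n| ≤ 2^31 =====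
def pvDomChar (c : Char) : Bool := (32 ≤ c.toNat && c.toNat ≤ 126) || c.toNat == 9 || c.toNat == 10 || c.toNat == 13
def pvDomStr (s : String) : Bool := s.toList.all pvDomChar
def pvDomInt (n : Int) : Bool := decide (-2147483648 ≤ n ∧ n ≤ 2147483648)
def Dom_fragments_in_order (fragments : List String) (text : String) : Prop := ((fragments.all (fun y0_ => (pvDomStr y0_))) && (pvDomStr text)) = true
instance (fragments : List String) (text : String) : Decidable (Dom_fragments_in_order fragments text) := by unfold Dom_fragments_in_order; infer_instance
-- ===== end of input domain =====

-- B replaces A's forward greedy loop (advance a lower bound with text.find) by a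
-- recursive reverse greedy over fragment indices, shrinking an upper bound with
-- text.rfind; same boolean by a greedy-exchange argument, proved below.

-- ===== PORT A =====
-- the for-loop over fragments with the running lower bound pos
def fioGo (text : String) (fragments : List String) (pos : Int) : Bool :=
  match fragments with
  | [] => true
  | frag :: rest =>
    let idx := PySem.Str.findFrom text frag pos none
    if idx < 0 then false
    else fioGo text rest (idx + PySem.Str.len frag)

def fragments_in_order (fragments : List String) (text : String) : Bool :=
  fioGo text fragments 0

-- ===== PORT B =====
-- the inner recursive helper ok(k, end_limit); the Nat fuel is k+1 so that fuel 0
-- is Python's k < 0 base case.  Python's fragments[k] always has k in range here,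
-- so getD's default is unreachable.
def fioOk (fragments : List String) (text : String) : Nat → Int → Bool
  | 0, _ => true
  | k + 1, endLimit =>
    let idx := PySem.Str.rfindFrom text (fragments.getD k "") 0 (some endLimit)
    decide (idx ≥ 0) && fioOk fragments text k idx

def fragments_in_order_alt (fragments : List String) (text : String) : Bool :=
  fioOk fragments text fragments.length (PySem.Str.len text)

-- ===== PRECONDITION & SPEC =====
def Spec_fragments_in_order (fragments : List String) (text : String) (out : Bool) : Prop := out = fragments_in_order_alt fragments text
instance (fragments : List String) (text : String) (out : Bool) : Decidable (Spec_fragments_in_order fragments text out) := by unfold Spec_fragments_in_order; infer_instance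

-- ===== CLAIM (what is proved, stated in full; the proofs are below) =====
def Claim_equal_fragments_in_order : Prop := ∀ (fragments : List String) (text : String), Dom_fragments_in_order fragments text → Spec_fragments_in_order fragments text (fragments_in_order fragments text)

-- ===== LEMMAS AND PROOFS =====

/-- `MatchIn t fs lo hi`: the fragments `fs` occur in `t`, in order, pairwise
non-overlapping, all inside the window `[lo, hi]`. -/
def MatchIn (t : List Char) : List String → Nat → Nat → Prop
  | [], lo, hi => lo ≤ hi
  | f :: fs, lo, hi => ∃ i : Nat, lo ≤ i ∧ f.toList <+: t.drop i ∧ MatchIn t fs (i + f.toList.length) hi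

lemma infix_iff_prefix_drop {α : Type} (t l : List α) :
    t <:+: l ↔ ∃ j : Nat, t <+: l.drop j := by
  constructor
  · rintro ⟨a, b, rfl⟩
    exact ⟨a.length, by simp [List.append_assoc]⟩
  · rintro ⟨j, h⟩
    exact h.isInfix.trans (List.drop_suffix j l).isInfix

lemma prefix_take_iff {α : Type} (sub l : List α) (m : Nat) :
    sub <+: l.take m ↔ sub <+: l ∧ sub.length ≤ m := by
  constructor
  · intro h
    refine ⟨h.trans (List.take_prefix m l), ?_⟩
    exact le_trans h.length_le (by simp)
  · rintro ⟨h, hm⟩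
    rw [List.prefix_iff_eq_take, List.take_take, Nat.min_eq_left hm, ← List.prefix_iff_eq_take]
    exact h

lemma matchIn_mono_lo (t : List Char) (fs : List String) {lo lo' hi : Nat}
    (h : lo' ≤ lo) (hm : MatchIn t fs lo hi) : MatchIn t fs lo' hi := by
  cases fs with
  | nil => exact le_trans h hm
  | cons f fs =>
    obtain ⟨i, hi1, hp, hrest⟩ := hm
    exact ⟨i, le_trans h hi1, hp, hrest⟩

lemma matchIn_mono_hi (t : List Char) (fs : List String) {lo hi hi' : Nat}
    (h : hi ≤ hi') (hm : MatchIn t fs lo hi) : MatchIn t fs lo hi' := by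
  induction fs generalizing lo with
  | nil => exact le_trans hm h
  | cons f fs ih =>
    obtain ⟨i, hi1, hp, hrest⟩ := hm
    exact ⟨i, hi1, hp, ih hrest⟩

lemma matchIn_snoc (t : List Char) (fs : List String) (f : String) (lo hi : Nat) :
    MatchIn t (fs ++ [f]) lo hi ↔
      ∃ i : Nat, f.toList <+: t.drop i ∧ i + f.toList.length ≤ hi ∧ MatchIn t fs lo i := by
  induction fs generalizing lo with
  | nil =>
    simp only [List.nil_append, MatchIn]
    constructor
    · rintro ⟨i, h1, h2, h3⟩; exact ⟨i, h2, h3, h1⟩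
    · rintro ⟨i, h1, h2, h3⟩; exact ⟨i, h3, h1, h2⟩
  | cons g gs ih =>
    simp only [List.cons_append, MatchIn]
    constructor
    · rintro ⟨i, h1, h2, h3⟩
      obtain ⟨j, hj1, hj2, hj3⟩ := (ih _).mp h3
      exact ⟨j, hj1, hj2, i, h1, h2, hj3⟩
    · rintro ⟨j, hj1, hj2, i, h1, h2, h3⟩
      exact ⟨i, h1, h2, (ih _).mpr ⟨j, hj1, hj2, h3⟩⟩

-- rfind.go searches indices k, k-1, …, 0 and returns the highest hit
lemma rfind_go_spec (l sub : List Char) : ∀ k : Nat,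
    (PySem.Chars.rfind.go l sub k = -1 ∧ ∀ j ≤ k, ¬ sub <+: l.drop j) ∨
    (∃ j : Nat, PySem.Chars.rfind.go l sub k = (j : Int) ∧ j ≤ k ∧ sub <+: l.drop j ∧
      ∀ m, j < m → m ≤ k → ¬ sub <+: l.drop m) := by
  intro k
  induction k with
  | zero =>
    by_cases h : sub.isPrefixOf l
    · right
      refine ⟨0, ?_, le_rfl, ?_, ?_⟩
      · simp [PySem.Chars.rfind.go, h]
      · simpa using List.isPrefixOf_iff_prefix.mp h
      · intro m hm hm0; omega
    · left
      constructor
      · simp [PySem.Chars.rfind.go, h]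
      · intro j hj
        interval_cases j
        simpa using fun hc => h (List.isPrefixOf_iff_prefix.mpr hc)
  | succ k ih =>
    by_cases h : sub.isPrefixOf (l.drop (k + 1))
    · right
      refine ⟨k + 1, ?_, le_rfl, List.isPrefixOf_iff_prefix.mp h, ?_⟩
      · simp [PySem.Chars.rfind.go, h]
      · intro m hm hm'; omega
    · have hgo : PySem.Chars.rfind.go l sub (k + 1) = PySem.Chars.rfind.go l sub k := by
        simp [PySem.Chars.rfind.go, h]
      have hnp : ¬ sub <+: l.drop (k + 1) := fun hc => h (List.isPrefixOf_iff_prefix.mpr hc)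
      rcases ih with ⟨h1, h2⟩ | ⟨j, h1, h2, h3, h4⟩
      · left
        refine ⟨hgo.trans h1, ?_⟩
        intro j hj
        rcases Nat.lt_or_ge j (k + 1) with hlt | hge
        · exact h2 j (by omega)
        · have : j = k + 1 := by omega
          subst this; exact hnp
      · right
        refine ⟨j, hgo.trans h1, by omega, h3, ?_⟩
        intro m hm hm'
        rcases Nat.lt_or_ge m (k + 1) with hlt | hge
        · exact h4 m hm (by omega)
        · have : m = k + 1 := by omega
          subst this; exact hnp

lemma rfind_neg_iff (l sub : List Char) :
    PySem.Chars.rfind l sub = -1 ↔ ∀ j : Nat, j ≤ l.length → ¬ sub <+: l.drop j := by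
  rcases rfind_go_spec l sub l.length with ⟨h1, h2⟩ | ⟨j, h1, h2, h3, h4⟩
  · simpa [PySem.Chars.rfind, h1] using h2
  · rw [PySem.Chars.rfind, h1]
    constructor
    · intro hc; omega
    · intro hall; exact absurd h3 (hall j h2)

lemma rfind_pos_spec (l sub : List Char) (h : PySem.Chars.rfind l sub ≠ -1) :
    ∃ j : Nat, PySem.Chars.rfind l sub = (j : Int) ∧ j ≤ l.length ∧ sub <+: l.drop j ∧
      ∀ m, j < m → m ≤ l.length → ¬ sub <+: l.drop m := by
  rcases rfind_go_spec l sub l.length with ⟨h1, _⟩ | ⟨j, h1, h2, h3, h4⟩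
  · exact absurd (by rw [PySem.Chars.rfind]; exact h1) h
  · exact ⟨j, by rw [PySem.Chars.rfind]; exact h1, h2, h3, h4⟩

lemma rfindFrom_eq_rfind_take (t sub : List Char) (e : Nat) (he : e ≤ t.length) :
    PySem.Chars.rfindFrom t sub 0 (some (e : Int)) = PySem.Chars.rfind (t.take e) sub := by
  have h1 : ¬ ((t.length : Int) < (e : Int)) := by exact_mod_cast Nat.not_lt.mpr he
  have h2 : ¬ ((e : Int) < 0) := by exact_mod_cast Int.not_lt.mpr (Int.natCast_nonneg e)
  simp only [PySem.Chars.rfindFrom, h1, if_false, h2]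
  norm_num
  split
  · next hc => exact absurd hc h2
  · split
    · next hr => rw [hr]
    · rfl

-- occurrence inside the prefix take e t  ↔  occurrence ending by e
lemma prefix_drop_take (t sub : List Char) (e i : Nat) (hie : i ≤ e) :
    sub <+: (t.take e).drop i ↔ sub <+: t.drop i ∧ i + sub.length ≤ e := by
  rw [List.drop_take, prefix_take_iff]
  constructor <;> rintro ⟨h1, h2⟩ <;> exact ⟨h1, by omega⟩

lemma fwd_iff (text : String) : ∀ (fs : List String) (k : Nat), k ≤ text.toList.length →
    (fioGo text fs (k : Int) = true ↔ MatchIn text.toList fs k text.toList.length) := by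
  intro fs
  induction fs with
  | nil => intro k hk; simpa [fioGo, MatchIn] using hk
  | cons f fs ih =>
    intro k hk
    rw [fioGo]
    simp only [PySem.Str.findFrom_eq, PySem.Str.len_eq]
    by_cases hneg : PySem.Chars.findFrom text.toList f.toList (k : Int) = -1
    · have hnin := (PySem.Chars.findFrom_natCast_eq_neg_one_iff text.toList f.toList k hk).mp hneg
      rw [infix_iff_prefix_drop] at hnin
      push Not at hnin
      constructor
      · intro hgo; rw [hneg] at hgo; simp at hgo
      · rintro ⟨i, hki, hp, _⟩
        exact absurd (by rw [List.drop_drop]; rw [Nat.add_sub_cancel' hki]; exact hp)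
          (hnin (i - k))
    · obtain ⟨hkF, hpF, hmin⟩ := PySem.Chars.findFrom_natCast_spec text.toList f.toList k hk hneg
      set F := PySem.Chars.findFrom text.toList f.toList (k : Int) with hFdef
      have hF0 : (0 : Int) ≤ F := le_trans (Int.natCast_nonneg k) hkF
      have hFnat : F = (F.toNat : Int) := (Int.toNat_of_nonneg hF0).symm
      have hFle : F.toNat ≤ text.toList.length := by
        have hff := PySem.Chars.findFrom_natCast text.toList f.toList k hk
        rw [← hFdef] at hff
        have hfl := PySem.Chars.find_le_length (text.toList.drop k) f.toList
        rw [List.length_drop] at hfl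
        split at hff
        · exact absurd hff hneg
        · omega
      have hkFn : k ≤ F.toNat := by omega
      have hlen : F.toNat + f.toList.length ≤ text.toList.length := by
        have := hpF.length_le
        rw [List.length_drop] at this
        omega
      have hcast : F + (f.toList.length : Int) = ((F.toNat + f.toList.length : Nat) : Int) := by
        rw [hFnat]; push_cast; omega
      rw [if_neg (Int.not_lt.mpr hF0), hcast, ih _ hlen]
      constructor
      · intro hm
        exact ⟨F.toNat, hkFn, hpF, hm⟩
      · rintro ⟨i, hki, hp, hrest⟩
        have hFi : F.toNat ≤ i := by
          by_contra hlt
          push Not at hlt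
          exact hmin i hki hlt hp
        exact matchIn_mono_lo _ fs (by omega) hrest

-- B's recursion: fuel k processes fragments[k-1], …, fragments[0], i.e. the
-- reversal of fs.take k, under the shrinking upper bound e.
lemma bk_iff (text : String) (fs : List String) : ∀ (k e : Nat), k ≤ fs.length →
    e ≤ text.toList.length →
    (fioOk fs text k (e : Int) = true ↔ MatchIn text.toList (fs.take k) 0 e) := by
  intro k
  induction k with
  | zero => intro e _ _; simp [fioOk, MatchIn]
  | succ k ih =>
    intro e hk he
    have hklt : k < fs.length := by omega
    have hget : fs.getD k "" = fs[k] := List.getD_eq_getElem fs "" hklt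
    have htake : fs.take (k + 1) = fs.take k ++ [fs[k]] := by
      rw [List.take_add_one, List.getElem?_eq_getElem hklt]; rfl
    rw [fioOk]
    simp only [PySem.Str.rfindFrom_eq, hget,
      rfindFrom_eq_rfind_take text.toList (fs[k]).toList e he, htake, matchIn_snoc]
    have hta : (text.toList.take e).length = e := by
      rw [List.length_take]; omega
    by_cases hneg : PySem.Chars.rfind (text.toList.take e) (fs[k]).toList = -1
    · have hall := (rfind_neg_iff _ _).mp hneg
      rw [hneg]
      constructor
      · intro hgo; simp at hgo
      · rintro ⟨i, hp, hie, _⟩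
        have hile : i ≤ e := by omega
        exact absurd ((prefix_drop_take text.toList (fs[k]).toList e i hile).mpr ⟨hp, hie⟩)
          (hall i (by omega))
    · obtain ⟨j, hRj, hjle, hjp, hjmax⟩ := rfind_pos_spec _ _ hneg
      rw [hta] at hjle hjmax
      obtain ⟨hjp', hje⟩ := (prefix_drop_take text.toList (fs[k]).toList e j hjle).mp hjp
      rw [hRj]
      have hdec : decide ((j : Int) ≥ 0) = true := by
        simp
      rw [hdec, Bool.true_and, ih j (by omega) (le_trans hjle he)]
      constructor
      · intro hm
        exact ⟨j, hjp', hje, hm⟩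
      · rintro ⟨i, hp, hie, hm⟩
        have hile : i ≤ e := by omega
        have hij : i ≤ j := by
          by_contra hlt
          push Not at hlt
          exact hjmax i hlt hile ((prefix_drop_take text.toList (fs[k]).toList e i hile).mpr ⟨hp, hie⟩)
        exact matchIn_mono_hi _ _ hij hm

-- ===== VERDICT (by name: the statement is the Claim_ definition above) =====
theorem fragments_in_order_spec : Claim_equal_fragments_in_order := by
  intro fragments text _
  unfold Spec_fragments_in_order fragments_in_order fragments_in_order_alt
  have h1 := fwd_iff text fragments 0 (Nat.zero_le _)
  have h2 := bk_iff text fragments fragments.length text.toList.length le_rfl le_rfl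
  rw [List.take_length] at h2
  rw [PySem.Str.len_eq]
  have h0 : ((0 : Nat) : Int) = (0 : Int) := rfl
  rw [← h0]
  cases hA : fioGo text fragments ((0 : Nat) : Int) <;>
    cases hB : fioOk fragments text fragments.length ((text.toList.length : Nat) : Int) <;> simp_all
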